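-- pv_equiv track=rewrite | github.com/AIRI-Institute/-IGOR | utils/crafter/dataset_utils.py | snake_case_to_title_case
-- ===== SOURCE A (Python) =====
-- from typing import List, Union
--
-- def snake_case_to_title_case(tasks: List[str]) -> List[str]:
--     """
--     Parameters:
--     tasks (List[str]): A list of task strings in snake_case format.
--
--     Returns:
--     List[str]: A list of transformed task strings in Title Case, each appended
--     with a count if the task occurs more than once.
--
--     Examples:
--     >>> transform_tasks(['eat_plant', 'eat_plant', 'collect_drink'])
--     ['Eat Plant with count 2', 'Collect Drink']
--
--     >>> transform_tasks(['defeat_zombie', 'collect_iron', 'wake_up', 'wake_up'])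
--     ['Defeat Zombie', 'Collect Iron', 'Wake Up with count 2']
--
--     >>> transform_tasks(['make_iron_pickaxe', 'eat_cow'])
--     ['Make Iron Pickaxe', 'Eat Cow']
--     """
--
--     task_count: dict[str, int] = {}
--     for task in tasks:
--         if task in task_count:
--             task_count[task] += 1
--         else:
--             task_count[task] = 1
--
--     transformed_tasks: List[str] = []
--     for task, count in task_count.items():
--         readable_task = task.replace('_', ' ').title()
--         if count > 1:
--             transformed_tasks.append(f"{readable_task} with count {count}")
--         else:
--             transformed_tasks.append(readable_task)
--
--     return transformed_tasks
-- ===== SOURCE B (Python) =====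
-- from typing import List, Union
--
-- def snake_case_to_title_case(tasks: List[str]) -> List[str]:
--     # Peel loop: format the first remaining task, counting it by how many
--     # elements removing all its occurrences deletes, then continue on the
--     # filtered remainder.  No counting table is ever built.
--     out: List[str] = []
--     rest = list(tasks)
--     while rest:
--         head = rest[0]
--         remaining = [t for t in rest[1:] if t != head]
--         count = len(rest) - len(remaining)
--         readable = head.replace('_', ' ').title()
--         out.append(f"{readable} with count {count}" if count > 1 else readable)
--         rest = remaining
--     return out
-- ===== Notes on version B (the rewrite author's own statement) =====
-- stated objective: alternative
-- what changed: Replaces the single-pass counting dict plus items loop with a peel loop: take the first remaining task, derive its count from the length drop when all its occurrences are filtered out, and continue on the filtered remainder; no counting table or dedup list is ever built.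
import Mathlib
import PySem

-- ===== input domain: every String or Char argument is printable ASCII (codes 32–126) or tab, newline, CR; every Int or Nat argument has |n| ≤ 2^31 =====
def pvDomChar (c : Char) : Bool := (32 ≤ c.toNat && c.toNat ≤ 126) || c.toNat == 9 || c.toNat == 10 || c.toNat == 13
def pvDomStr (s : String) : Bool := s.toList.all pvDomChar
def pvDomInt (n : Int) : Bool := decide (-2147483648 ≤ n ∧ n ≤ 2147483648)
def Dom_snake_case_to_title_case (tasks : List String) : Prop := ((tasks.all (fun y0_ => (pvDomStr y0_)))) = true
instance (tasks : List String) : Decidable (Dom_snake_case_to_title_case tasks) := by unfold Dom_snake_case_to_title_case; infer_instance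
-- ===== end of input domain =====

-- B replaces the counting dict + items loop by a peel loop (filter out the head's
-- occurrences, count = length drop, continue on the remainder) — objective: alternative;
-- slower on large inputs (quadratic in the worst case), no counting table is built.

-- shared helper: Python's str.title() on the ASCII domain (uppercase a letter after a
-- non-letter, lowercase a letter after a letter; exact for ASCII since cased = alphabetic there)
def pyTitleGo : Bool → List Char → List Char
  | _, [] => []
  | prev, c :: cs =>
      (if prev then PySem.Chars.lowerChar c else PySem.Chars.upperChar c) ::
        pyTitleGo (PySem.Chars.isalpha c) cs

-- shared helper: task.replace('_',' ').title() plus the conditional " with count {count}" suffix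
def fmtTask (task : String) (count : Int) : String :=
  let readable := String.ofList (pyTitleGo false (PySem.Str.replace task "_" " ").toList)
  if count > 1 then
    String.ofList (readable.toList ++ " with count ".toList ++ PySem.Int.toChars count)
  else readable

-- ===== PORT A =====
def snake_case_to_title_case (tasks : List String) : List String :=
  -- for task in tasks: if task in task_count: task_count[task] += 1 else: task_count[task] = 1
  let task_count : PySem.Dict String Int :=
    tasks.foldl
      (fun d task =>
        if d.contains task then d.insert task (d.getD task 0 + 1)
        else d.insert task 1)
      PySem.Dict.empty
  -- for task, count in task_count.items(): transformed_tasks.append(…)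
  task_count.items.foldl (fun acc p => acc ++ [fmtTask p.1 p.2]) []

-- ===== PORT B =====
-- the while loop: peel the first remaining task, append its formatting to out
def altLoop (rest : List String) (out : List String) : List String :=
  match rest with
  | [] => out
  | head :: r0 =>
      -- remaining = [t for t in rest[1:] if t != head]; count = len(rest) - len(remaining)
      let remaining := r0.filter (fun t => t ≠ head)
      let count : Int := ((head :: r0).length : Int) - (remaining.length : Int)
      altLoop remaining (out ++ [fmtTask head count])
termination_by rest.length
decreasing_by
  simp only [List.length_cons, List.length_unattach]
  exact Nat.lt_succ_of_le ((List.length_filter_le _ _).trans (by simp))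

def snake_case_to_title_case_alt (tasks : List String) : List String :=
  altLoop tasks []

-- ===== PRECONDITION & SPEC =====
def Spec_snake_case_to_title_case (tasks : List String) (out : List String) : Prop := out = snake_case_to_title_case_alt tasks
instance (tasks : List String) (out : List String) : Decidable (Spec_snake_case_to_title_case tasks out) := by unfold Spec_snake_case_to_title_case; infer_instance

-- ===== CLAIM =====
def Claim_equal_snake_case_to_title_case : Prop := ∀ (tasks : List String), Dom_snake_case_to_title_case tasks → Spec_snake_case_to_title_case tasks (snake_case_to_title_case tasks)

-- ===== LEMMAS AND PROOFS =====

-- A's tallying loop step is exactly the Counter step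
lemma step_eq_counter_step :
    (fun (d : PySem.Dict String Int) task =>
        if d.contains task then d.insert task (d.getD task 0 + 1)
        else d.insert task 1)
      = (fun d x => d.insert x (d.getD x 0 + 1)) := by
  funext d x
  by_cases h : d.contains x = true
  · simp [h]
  · simp [h, PySem.Dict.getD_of_not_contains]

-- folding Set.add over l skips every element already in s; dropping the h's changes nothing
lemma foldl_add_filter (l : List String) (s : PySem.Set String) (h : String)
    (hs : h ∈ s) :
    l.foldl PySem.Set.add s = (l.filter (fun t => t ≠ h)).foldl PySem.Set.add s := by
  induction l generalizing s with
  | nil => rfl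
  | cons a t ih =>
      by_cases hah : a = h
      · subst hah
        have : PySem.Set.add s a = s := by simp [PySem.Set.add, PySem.Set.contains, hs]
        simp [this, ih s hs]
      · have : h ∈ PySem.Set.add s a := by simp [PySem.Set.mem_add, hs]
        simp [hah, List.foldl_cons, ih _ this]

-- a leading element not occurring in l stays in front of the fold
lemma foldl_add_cons (l : List String) (s : List String) (h : String)
    (hl : h ∉ l) :
    l.foldl PySem.Set.add (h :: s) = h :: l.foldl PySem.Set.add s := by
  induction l generalizing s with
  | nil => rfl
  | cons a t ih =>
      have hah : a ≠ h := fun e => hl (e ▸ List.mem_cons_self)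
      have hlt : h ∉ t := fun m => hl (List.mem_cons_of_mem _ m)
      have : PySem.Set.add (h :: s) a = h :: PySem.Set.add s a := by
        by_cases has : a ∈ s <;> simp [PySem.Set.add, PySem.Set.contains, hah, has]
      rw [List.foldl_cons, this, List.foldl_cons, ih _ hlt]

lemma ofList_cons_filter (h : String) (l : List String) :
    PySem.Set.ofList (h :: l) = h :: PySem.Set.ofList (l.filter (fun t => t ≠ h)) := by
  have h1 : PySem.Set.ofList (h :: l) = l.foldl PySem.Set.add [h] := by
    simp [PySem.Set.ofList_eq_foldl, PySem.Set.add, PySem.Set.contains]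
  have h2 : PySem.Set.ofList (l.filter (fun t => t ≠ h))
      = (l.filter (fun t => t ≠ h)).foldl PySem.Set.add [] := by
    simp [PySem.Set.ofList_eq_foldl]
  have hnotin : h ∉ l.filter (fun t => t ≠ h) := by
    intro m
    have := List.of_mem_filter m
    simp at this
  rw [h1, foldl_add_filter l [h] h (by simp), h2,
      show ([h] : List String) = h :: [] from rfl,
      foldl_add_cons _ _ _ hnotin]

-- the length drop when filtering out h equals the number of h's
lemma length_sub_filter_count (l : List String) (h : String) :
    l.length = (l.filter (fun t => t ≠ h)).length + l.count h := by
  induction l with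
  | nil => rfl
  | cons a t ih =>
      by_cases hah : a = h
      · subst hah; simp [ih]; omega
      · simp [hah, ih]; omega

-- B's loop computes the map of fmtTask over the first-occurrence dedup with full counts
lemma altLoop_eq_map (l : List String) (acc : List String) :
    altLoop l acc
      = acc ++ (PySem.Set.ofList l).map (fun k => fmtTask k ((l.count k : Int))) := by
  induction hn : l.length using Nat.strong_induction_on generalizing l acc with
  | _ n ih =>
    match l with
    | [] => simp [altLoop]
    | head :: rest0 =>
      rw [altLoop, ofList_cons_filter]
      have hlen : (rest0.filter (fun t => t ≠ head)).length < n := by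
        subst hn
        simp only [List.length_cons]
        exact Nat.lt_succ_of_le (List.length_filter_le _ _)
      rw [ih _ hlen _ _ rfl, List.append_assoc, List.singleton_append]
      simp only [List.map_cons]
      congr 2
      · -- head's count
        congr 1
        have := length_sub_filter_count rest0 head
        simp only [List.length_cons, List.count_cons_self]
        push_cast
        omega
      · -- tail: counts in the filtered list agree with counts in l for surviving keys
        apply List.map_congr_left
        intro k hk
        have hkmem : k ∈ rest0.filter (fun t => t ≠ head) := by
          rw [PySem.Set.mem_ofList] at hk; exact hk
        have hkne : k ≠ head := by
          have := List.of_mem_filter hkmem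
          simpa using this
        have hcnt : (rest0.filter (fun t => t ≠ head)).count k = rest0.count k := by
          rw [List.count_filter]
          simp [hkne]
        rw [hcnt, List.count_cons_of_ne (Ne.symm hkne)]

-- ===== VERDICT =====
theorem snake_case_to_title_case_spec : Claim_equal_snake_case_to_title_case := by
  intro tasks _
  unfold Spec_snake_case_to_title_case snake_case_to_title_case snake_case_to_title_case_alt
  rw [step_eq_counter_step, PySem.Dict.foldl_insert_getD_add_one_eq_counter,
      PySem.List.foldl_append_singleton_eq_map, PySem.Dict.items_counter,
      List.map_map, altLoop_eq_map]
  simp [Function.comp]
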